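-- pv_equiv track=rewrite | github.com/joshikaushal-hue/parivar-saathi-bot | call_logic.py | detect_objection
-- ===== SOURCE A (Python) =====
-- from typing import Optional
--
-- OBJECTION_COST           = "cost"
--
-- OBJECTION_DELAY          = "delay"
--
-- OBJECTION_FEAR           = "fear"
--
-- OBJECTION_SECOND_OPINION = "second_opinion"
--
-- OBJECTION_PARTNER        = "partner"
--
-- OBJECTION_NOT_INTERESTED = "not_interested"
--
-- OBJECTION_KEYWORDS = {
--     OBJECTION_COST: [
--         "expensive", "costly", "afford", "cost", "price", "fees",
--         "paisa", "paise", "mehenga", "budget", "money", "payment",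
--     ],
--     OBJECTION_DELAY: [
--         "wait", "later", "not now", "try more", "baad mein", "abhi nahi",
--         "kuch time aur", "few more months", "next year", "not ready",
--     ],
--     OBJECTION_FEAR: [
--         "scared", "afraid", "fear", "darr", "dar", "failed before",
--         "what if", "not sure", "nervous", "worried", "tension",
--     ],
--     OBJECTION_SECOND_OPINION: [
--         "other doctor", "another clinic", "second opinion", "dusra doctor",
--         "already consulted", "comparing", "thinking about other",
--     ],
--     OBJECTION_PARTNER: [
--         "husband", "wife", "partner", "spouse", "not sure yet", "discuss",
--         "tell them", "ask them", "together", "pati", "patni",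
--     ],
--     OBJECTION_NOT_INTERESTED: [
--         "not interested", "don't want", "nahi chahiye", "no thanks",
--         "hang up", "remove my number", "don't call",
--     ],
-- }
--
-- def detect_objection(caller_text: str) -> Optional[str]:
--     """
--     Scan caller speech for objection keywords.
--     Returns the first matched objection type, or None.
--     Priority: not_interested → cost → delay → fear → second_opinion → partner
--     """
--     text = caller_text.lower()
--
--     priority_order = [
--         OBJECTION_NOT_INTERESTED,
--         OBJECTION_COST,
--         OBJECTION_DELAY,
--         OBJECTION_FEAR,
--         OBJECTION_SECOND_OPINION,
--         OBJECTION_PARTNER,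
--     ]
--     for obj_type in priority_order:
--         for kw in OBJECTION_KEYWORDS[obj_type]:
--             if kw in text:
--                 return obj_type
--     return None
-- ===== SOURCE B (Python) =====
-- from typing import Optional
--
-- # Priority ranks: index in this list = rank (0 = highest priority).
-- PRIORITY_ORDER = [
--     "not_interested", "cost", "delay", "fear", "second_opinion", "partner",
-- ]
--
-- # One flat keyword table: (priority rank, keyword).
-- KEYWORD_TABLE = [
--     (0, 'not interested'), (0, "don't want"), (0, 'nahi chahiye'), (0, 'no thanks'),
--     (0, 'hang up'), (0, 'remove my number'), (0, "don't call"), (1, 'expensive'),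
--     (1, 'costly'), (1, 'afford'), (1, 'cost'), (1, 'price'),
--     (1, 'fees'), (1, 'paisa'), (1, 'paise'), (1, 'mehenga'),
--     (1, 'budget'), (1, 'money'), (1, 'payment'), (2, 'wait'),
--     (2, 'later'), (2, 'not now'), (2, 'try more'), (2, 'baad mein'),
--     (2, 'abhi nahi'), (2, 'kuch time aur'), (2, 'few more months'), (2, 'next year'),
--     (2, 'not ready'), (3, 'scared'), (3, 'afraid'), (3, 'fear'),
--     (3, 'darr'), (3, 'dar'), (3, 'failed before'), (3, 'what if'),
--     (3, 'not sure'), (3, 'nervous'), (3, 'worried'), (3, 'tension'),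
--     (4, 'other doctor'), (4, 'another clinic'), (4, 'second opinion'), (4, 'dusra doctor'),
--     (4, 'already consulted'), (4, 'comparing'), (4, 'thinking about other'), (5, 'husband'),
--     (5, 'wife'), (5, 'partner'), (5, 'spouse'), (5, 'not sure yet'),
--     (5, 'discuss'), (5, 'tell them'), (5, 'ask them'), (5, 'together'),
--     (5, 'pati'), (5, 'patni'),
-- ]
--
-- def detect_objection(caller_text: str) -> Optional[str]:
--     """Single fold over a flat (rank, keyword) table keeping the minimum
--     priority rank that has a keyword hit; index the priority list at the end."""
--     text = caller_text.lower()
--     best = None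
--     for rank, kw in KEYWORD_TABLE:
--         if (best is None or rank < best) and kw in text:
--             best = rank
--     return PRIORITY_ORDER[best] if best is not None else None
-- ===== Notes on version B (the rewrite author's own statement) =====
-- stated objective: alternative
-- what changed: A's nested priority-then-keyword loops with early return are replaced by one fold over a flat (rank, keyword) table that keeps the minimum priority rank with a substring hit, followed by indexing the priority list; correctness holds because the first type A returns is exactly the one of minimal rank with a hit.
import Mathlib
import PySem

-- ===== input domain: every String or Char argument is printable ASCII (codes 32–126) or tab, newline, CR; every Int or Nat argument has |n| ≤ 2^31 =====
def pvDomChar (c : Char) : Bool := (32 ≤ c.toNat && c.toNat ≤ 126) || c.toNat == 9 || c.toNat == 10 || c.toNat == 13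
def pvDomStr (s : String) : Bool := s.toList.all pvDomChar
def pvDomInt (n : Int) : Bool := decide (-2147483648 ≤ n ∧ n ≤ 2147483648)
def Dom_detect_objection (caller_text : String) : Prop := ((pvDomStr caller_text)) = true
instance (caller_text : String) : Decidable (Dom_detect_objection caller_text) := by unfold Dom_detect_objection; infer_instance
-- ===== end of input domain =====

-- B replaces A's nested priority-then-keyword loops (early return) by one fold over a
-- flat (rank, keyword) table keeping the minimum priority rank with a substring hit,
-- then indexing the priority list (objective: alternative).


-- ===== PORT A =====
-- module-level constants used by A
def pvKwCost : List String :=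
  ["expensive", "costly", "afford", "cost", "price", "fees",
   "paisa", "paise", "mehenga", "budget", "money", "payment"]
def pvKwDelay : List String :=
  ["wait", "later", "not now", "try more", "baad mein", "abhi nahi",
   "kuch time aur", "few more months", "next year", "not ready"]
def pvKwFear : List String :=
  ["scared", "afraid", "fear", "darr", "dar", "failed before",
   "what if", "not sure", "nervous", "worried", "tension"]
def pvKwSecond : List String :=
  ["other doctor", "another clinic", "second opinion", "dusra doctor",
   "already consulted", "comparing", "thinking about other"]
def pvKwPartner : List String :=
  ["husband", "wife", "partner", "spouse", "not sure yet", "discuss",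
   "tell them", "ask them", "together", "pati", "patni"]
def pvKwNotInt : List String :=
  ["not interested", "don't want", "nahi chahiye", "no thanks",
   "hang up", "remove my number", "don't call"]

def pvObjectionKeywords : PySem.Dict String (List String) :=
  PySem.Dict.mk [("cost", pvKwCost), ("delay", pvKwDelay), ("fear", pvKwFear),
   ("second_opinion", pvKwSecond), ("partner", pvKwPartner), ("not_interested", pvKwNotInt)]

def pvPriorityA : List String :=
  ["not_interested", "cost", "delay", "fear", "second_opinion", "partner"]

-- inner 'for kw in OBJECTION_KEYWORDS[obj_type]: if kw in text: return obj_type'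
def pvInnerA (text objType : String) : List String → Option String
  | [] => none
  | kw :: rest => if PySem.Str.isIn kw text then some objType else pvInnerA text objType rest

-- outer 'for obj_type in priority_order'
def pvOuterA (text : String) : List String → Option String
  | [] => none
  | t :: rest =>
    match pvInnerA text t (PySem.Dict.getD pvObjectionKeywords t []) with
    | some r => some r
    | none => pvOuterA text rest

def detect_objection (caller_text : String) : Option String :=
  pvOuterA (PySem.Str.lower caller_text) pvPriorityA

-- ===== PORT B =====
-- B's module-level constants: a priority list indexed by rank, and one flat (rank, keyword) table
def pvPriorityOrder : List String :=
  ["not_interested", "cost", "delay", "fear", "second_opinion", "partner"]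

def pvKeywordTable : List (Int × String) :=
  [((0 : Int), "not interested"), ((0 : Int), "don't want"), ((0 : Int), "nahi chahiye"), ((0 : Int), "no thanks"),
   ((0 : Int), "hang up"), ((0 : Int), "remove my number"), ((0 : Int), "don't call"), ((1 : Int), "expensive"),
   ((1 : Int), "costly"), ((1 : Int), "afford"), ((1 : Int), "cost"), ((1 : Int), "price"),
   ((1 : Int), "fees"), ((1 : Int), "paisa"), ((1 : Int), "paise"), ((1 : Int), "mehenga"),
   ((1 : Int), "budget"), ((1 : Int), "money"), ((1 : Int), "payment"), ((2 : Int), "wait"),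
   ((2 : Int), "later"), ((2 : Int), "not now"), ((2 : Int), "try more"), ((2 : Int), "baad mein"),
   ((2 : Int), "abhi nahi"), ((2 : Int), "kuch time aur"), ((2 : Int), "few more months"), ((2 : Int), "next year"),
   ((2 : Int), "not ready"), ((3 : Int), "scared"), ((3 : Int), "afraid"), ((3 : Int), "fear"),
   ((3 : Int), "darr"), ((3 : Int), "dar"), ((3 : Int), "failed before"), ((3 : Int), "what if"),
   ((3 : Int), "not sure"), ((3 : Int), "nervous"), ((3 : Int), "worried"), ((3 : Int), "tension"),
   ((4 : Int), "other doctor"), ((4 : Int), "another clinic"), ((4 : Int), "second opinion"), ((4 : Int), "dusra doctor"),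
   ((4 : Int), "already consulted"), ((4 : Int), "comparing"), ((4 : Int), "thinking about other"), ((5 : Int), "husband"),
   ((5 : Int), "wife"), ((5 : Int), "partner"), ((5 : Int), "spouse"), ((5 : Int), "not sure yet"),
   ((5 : Int), "discuss"), ((5 : Int), "tell them"), ((5 : Int), "ask them"), ((5 : Int), "together"),
   ((5 : Int), "pati"), ((5 : Int), "patni")]

-- loop body: 'if (best is None or rank < best) and kw in text: best = rank'
def pvStepB (text : String) (best : Option Int) (p : Int × String) : Option Int :=
  match best with
  | none => if PySem.Str.isIn p.2 text then some p.1 else none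
  | some b => if p.1 < b ∧ PySem.Str.isIn p.2 text = true then some p.1 else some b

def detect_objection_alt (caller_text : String) : Option String :=
  match pvKeywordTable.foldl (pvStepB (PySem.Str.lower caller_text)) none with
  | none => none
  | some r => PySem.List.pyGet? pvPriorityOrder r

-- ===== PRECONDITION & SPEC =====
def Spec_detect_objection (caller_text : String) (out : Option String) : Prop := out = detect_objection_alt caller_text
instance (caller_text : String) (out : Option String) : Decidable (Spec_detect_objection caller_text out) := by unfold Spec_detect_objection; infer_instance

-- ===== CLAIM (what is proved, stated in full; the proofs are below) =====
def Claim_equal_detect_objection : Prop := ∀ (caller_text : String), Dom_detect_objection caller_text → Spec_detect_objection caller_text (detect_objection caller_text)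

-- ===== LEMMAS AND PROOFS =====
-- A's inner loop is the 'any' of the substring tests
theorem pvInnerA_eq_any (text objType : String) (kws : List String) :
    pvInnerA text objType kws =
      if kws.any (fun kw => PySem.Str.isIn kw text) then some objType else none := by
  induction kws with
  | nil => simp [pvInnerA]
  | cons kw rest ih =>
    simp only [pvInnerA, ih, List.any_cons, Bool.or_eq_true]
    split_ifs <;> tauto

theorem pvOuterA_cons (text t : String) (rest : List String) :
    pvOuterA text (t :: rest) =
      if (PySem.Dict.getD pvObjectionKeywords t []).any (fun kw => PySem.Str.isIn kw text)
      then some t else pvOuterA text rest := by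
  by_cases hb : ((PySem.Dict.getD pvObjectionKeywords t []).any (fun kw => PySem.Str.isIn kw text)) = true
  · simp only [pvOuterA, pvInnerA_eq_any, if_pos hb]
  · simp only [pvOuterA, pvInnerA_eq_any, if_neg hb]

-- B's fold over a constant-rank block leaves an accumulator it cannot improve
theorem pvFold_block_stay (text : String) (b r : Int) (h : ¬ r < b) (kws : List String) :
    (kws.map (fun kw => (r, kw))).foldl (pvStepB text) (some b) = some b := by
  induction kws with
  | nil => rfl
  | cons kw rest ih => simpa [pvStepB, h] using ih

-- B's fold over a constant-rank block from an empty accumulator is the 'any' of its hits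
theorem pvFold_block_none (text : String) (r : Int) (kws : List String) :
    (kws.map (fun kw => (r, kw))).foldl (pvStepB text) none =
      if kws.any (fun kw => PySem.Str.isIn kw text) then some r else none := by
  induction kws with
  | nil => simp
  | cons kw rest ih =>
    simp only [List.map_cons, List.foldl_cons, List.any_cons]
    by_cases hk : PySem.Str.isIn kw text = true
    · rw [show pvStepB text none (r, kw) = some r from by simp only [pvStepB]; rw [hk]; rfl,
        pvFold_block_stay text r r (lt_irrefl r)]
      simp only [hk, Bool.true_or]
      rfl
    · rw [Bool.not_eq_true] at hk
      rw [show pvStepB text none (r, kw) = none from by simp only [pvStepB]; rw [hk]; rfl, ih]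
      simp only [hk, Bool.false_or]

theorem pvTable_blocks :
    pvKeywordTable =
      (pvKwNotInt.map fun kw => ((0 : Int), kw)) ++ (pvKwCost.map fun kw => ((1 : Int), kw)) ++
      (pvKwDelay.map fun kw => ((2 : Int), kw)) ++ (pvKwFear.map fun kw => ((3 : Int), kw)) ++
      (pvKwSecond.map fun kw => ((4 : Int), kw)) ++ (pvKwPartner.map fun kw => ((5 : Int), kw)) := rfl

theorem pv_main (text : String) :
    pvOuterA text pvPriorityA =
      match pvKeywordTable.foldl (pvStepB text) none with
      | none => none
      | some r => PySem.List.pyGet? pvPriorityOrder r := by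
  have e1 : PySem.Dict.getD pvObjectionKeywords "not_interested" [] = pvKwNotInt := rfl
  have e2 : PySem.Dict.getD pvObjectionKeywords "cost" [] = pvKwCost := rfl
  have e3 : PySem.Dict.getD pvObjectionKeywords "delay" [] = pvKwDelay := rfl
  have e4 : PySem.Dict.getD pvObjectionKeywords "fear" [] = pvKwFear := rfl
  have e5 : PySem.Dict.getD pvObjectionKeywords "second_opinion" [] = pvKwSecond := rfl
  have e6 : PySem.Dict.getD pvObjectionKeywords "partner" [] = pvKwPartner := rfl
  rw [pvTable_blocks]
  simp only [List.foldl_append]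
  simp only [pvPriorityA, pvOuterA_cons, e1, e2, e3, e4, e5, e6]
  rw [pvFold_block_none text 0 pvKwNotInt]
  by_cases h1 : (pvKwNotInt.any fun kw => PySem.Str.isIn kw text) = true
  · rw [if_pos h1, if_pos h1,
      pvFold_block_stay text 0 1 (by decide) pvKwCost,
      pvFold_block_stay text 0 2 (by decide) pvKwDelay,
      pvFold_block_stay text 0 3 (by decide) pvKwFear,
      pvFold_block_stay text 0 4 (by decide) pvKwSecond,
      pvFold_block_stay text 0 5 (by decide) pvKwPartner]
    rfl
  · rw [if_neg h1, if_neg h1, pvFold_block_none text 1 pvKwCost]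
    by_cases h2 : (pvKwCost.any fun kw => PySem.Str.isIn kw text) = true
    · rw [if_pos h2, if_pos h2,
        pvFold_block_stay text 1 2 (by decide) pvKwDelay,
        pvFold_block_stay text 1 3 (by decide) pvKwFear,
        pvFold_block_stay text 1 4 (by decide) pvKwSecond,
        pvFold_block_stay text 1 5 (by decide) pvKwPartner]
      rfl
    · rw [if_neg h2, if_neg h2, pvFold_block_none text 2 pvKwDelay]
      by_cases h3 : (pvKwDelay.any fun kw => PySem.Str.isIn kw text) = true
      · rw [if_pos h3, if_pos h3,
          pvFold_block_stay text 2 3 (by decide) pvKwFear,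
          pvFold_block_stay text 2 4 (by decide) pvKwSecond,
          pvFold_block_stay text 2 5 (by decide) pvKwPartner]
        rfl
      · rw [if_neg h3, if_neg h3, pvFold_block_none text 3 pvKwFear]
        by_cases h4 : (pvKwFear.any fun kw => PySem.Str.isIn kw text) = true
        · rw [if_pos h4, if_pos h4,
            pvFold_block_stay text 3 4 (by decide) pvKwSecond,
            pvFold_block_stay text 3 5 (by decide) pvKwPartner]
          rfl
        · rw [if_neg h4, if_neg h4, pvFold_block_none text 4 pvKwSecond]
          by_cases h5 : (pvKwSecond.any fun kw => PySem.Str.isIn kw text) = true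
          · rw [if_pos h5, if_pos h5,
              pvFold_block_stay text 4 5 (by decide) pvKwPartner]
            rfl
          · rw [if_neg h5, if_neg h5, pvFold_block_none text 5 pvKwPartner]
            by_cases h6 : (pvKwPartner.any fun kw => PySem.Str.isIn kw text) = true
            · rw [if_pos h6, if_pos h6]
              rfl
            · rw [if_neg h6, if_neg h6]
              rfl

-- ===== VERDICT (by name: the statement is the Claim_ definition above) =====
theorem detect_objection_spec : Claim_equal_detect_objection := by
  intro s _
  unfold Spec_detect_objection detect_objection detect_objection_alt
  exact pv_main (PySem.Str.lower s)
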